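-- pv_equiv track=rewrite | github.com/fa-ris/hypnono | interactive.py | contians_wn
-- ===== SOURCE A (Python) =====
-- white_noise = ["white noise"]
--
-- def contians_wn(in_str):
--     if len(in_str) == 0:
--         return False
--     to_check = in_str.split()
--     for i in range(len(to_check) - 1):
--         to_to_check = to_check[i] + " " + to_check[i + 1]
--         if to_to_check in white_noise:
--             return True
--     return False
-- ===== SOURCE B (Python) =====
-- def contians_wn(in_str):
--     return ' white noise ' in ' ' + ' '.join(in_str.split()) + ' '
-- ===== Notes on version B (the rewrite author's own statement) =====
-- stated objective: idiomatic
-- what changed: Replaces the indexed loop over adjacent word pairs (concatenating each pair and testing membership in a singleton list) by a single normalized substring test: join the words with single spaces, pad both ends with a space, and search for the space-padded phrase once.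
import Mathlib
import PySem

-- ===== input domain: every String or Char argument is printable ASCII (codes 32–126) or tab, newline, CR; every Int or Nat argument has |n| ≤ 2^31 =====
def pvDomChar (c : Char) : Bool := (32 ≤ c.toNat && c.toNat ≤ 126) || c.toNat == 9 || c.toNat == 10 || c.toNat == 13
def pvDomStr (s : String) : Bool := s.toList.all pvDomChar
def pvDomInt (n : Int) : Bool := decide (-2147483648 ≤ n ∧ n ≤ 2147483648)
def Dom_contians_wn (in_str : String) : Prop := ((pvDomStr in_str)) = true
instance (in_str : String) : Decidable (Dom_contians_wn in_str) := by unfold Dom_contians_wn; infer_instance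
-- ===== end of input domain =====

-- B replaces A's indexed loop over adjacent word pairs by one space-normalized substring test (idiomatic one-liner, same cost).

-- ===== PORT A =====
def white_noise : List String := ["white noise"]

def contians_wn (in_str : String) : Bool :=
  if PySem.Str.len in_str == 0 then false
  else
    let to_check := PySem.Str.split₀ in_str
    -- for i in range(len-1): early 'return True' on a hit = List.any over the range;
    -- indices i and i+1 are always in range there, so getD's default is never used
    (List.range (to_check.length - 1)).any (fun i =>
      white_noise.contains (to_check.getD i "" ++ " " ++ to_check.getD (i+1) ""))

-- ===== PORT B =====
def contians_wn_alt (in_str : String) : Bool :=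
  PySem.Str.isIn " white noise " (" " ++ PySem.Str.join " " (PySem.Str.split₀ in_str) ++ " ")

-- ===== PRECONDITION & SPEC =====
def Spec_contians_wn (in_str : String) (out : Bool) : Prop := out = contians_wn_alt in_str
instance (in_str : String) (out : Bool) : Decidable (Spec_contians_wn in_str out) := by unfold Spec_contians_wn; infer_instance

-- ===== CLAIM (what is proved, stated in full; the proofs are below) =====
def Claim_equal_contians_wn : Prop := ∀ (in_str : String), Dom_contians_wn in_str → Spec_contians_wn in_str (contians_wn in_str)

-- ===== LEMMAS AND PROOFS =====

theorem split₀_go_spacefree (s : List Char) : ∀ (cur : List Char) (acc : List (List Char)),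
    (' ' ∉ cur) → (∀ w ∈ acc, ' ' ∉ w) →
    ∀ w ∈ PySem.Chars.split₀.go s cur acc, ' ' ∉ w := by
  induction s with
  | nil =>
    intro cur acc hcur hacc w hw
    unfold PySem.Chars.split₀.go at hw
    by_cases h : cur.isEmpty = true <;> simp [h] at hw
    · exact hacc w hw
    · rcases hw with h' | h'
      · exact hacc w h'
      · subst h'; simpa using hcur
  | cons c rest ih =>
    intro cur acc hcur hacc w hw
    unfold PySem.Chars.split₀.go at hw
    by_cases hsp : PySem.Chars.isspace c = true
    · by_cases he : cur.isEmpty = true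
      · simp only [hsp, he, if_true] at hw
        exact ih [] acc (by simp) hacc w hw
      · simp only [hsp, he, if_true] at hw
        refine ih [] (cur.reverse :: acc) (by simp) ?_ w hw
        intro v hv
        rcases List.mem_cons.mp hv with h' | h'
        · subst h'; simpa using hcur
        · exact hacc v h'
    · simp only [hsp] at hw
      refine ih (c :: cur) acc ?_ hacc w hw
      intro hmem
      rcases List.mem_cons.mp hmem with h' | h'
      · exact hsp (by rw [← h']; decide)
      · exact hcur h'

theorem split₀_spacefree (l : List Char) : ∀ w ∈ PySem.Chars.split₀ l, ' ' ∉ w := by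
  have := split₀_go_spacefree l [] [] (by simp) (by simp)
  simpa [PySem.Chars.split₀] using this

theorem prefix_block (u : List Char) : ∀ (w t s : List Char), (' ' ∉ u) → (' ' ∉ w) →
    u ++ ' ' :: t <+: w ++ ' ' :: s → u = w ∧ t <+: s := by
  induction u with
  | nil =>
    intro w t s _ hw h
    cases w with
    | nil => exact ⟨rfl, by simpa using h⟩
    | cons c w' =>
      have h2 : (' ' = c) ∧ (t <+: w' ++ ' ' :: s) := by simpa using h
      exact absurd h2.1.symm (by intro hc; exact hw (by simp [hc]))
  | cons a u' ih =>
    intro w t s hu hw h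
    cases w with
    | nil =>
      have h2 : (a = ' ') ∧ (u' ++ ' ' :: t <+: s) := by simpa using h
      exact absurd h2.1 (by intro hc; exact hu (by simp [hc]))
    | cons c w' =>
      have h2 : (a = c) ∧ (u' ++ ' ' :: t <+: w' ++ ' ' :: s) := by simpa using h
      have hrec := ih w' t s (fun hm => hu (by simp [hm])) (fun hm => hw (by simp [hm])) h2.2
      exact ⟨by simp [h2.1, hrec.1], hrec.2⟩

theorem eq_block (u w t s : List Char) (hu : ' ' ∉ u) (hw : ' ' ∉ w)
    (h : u ++ ' ' :: t = w ++ ' ' :: s) : u = w ∧ t = s := by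
  obtain ⟨h1, _⟩ := prefix_block u w t s hu hw (h ▸ List.prefix_refl _)
  subst h1
  have := List.append_cancel_left h
  exact ⟨rfl, by simpa using this⟩

def pvWhite : List Char := ['w','h','i','t','e']
def pvNoise : List Char := ['n','o','i','s','e']
def pvPat : List Char := ' ' :: pvWhite ++ ' ' :: (pvNoise ++ [' '])

def pairsC : List (List Char) → Bool
  | a :: b :: t => ((a ++ ' ' :: b) == pvWhite ++ ' ' :: pvNoise) || pairsC (b :: t)
  | _ => false

theorem peel (w : List Char) (hw : ' ' ∉ w) : ∀ s : List Char,
    (pvPat <:+: w ++ ' ' :: s ↔ pvPat <:+: ' ' :: s) := by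
  induction w with
  | nil => intro s; simp
  | cons c w' ih =>
    intro s
    rw [List.cons_append, List.infix_cons_iff]
    constructor
    · rintro (h | h)
      · have h2 : (' ' = c) ∧ (pvWhite ++ ' ' :: (pvNoise ++ [' ']) <+: w' ++ ' ' :: s) := by
          simpa [pvPat] using h
        exact absurd h2.1.symm (fun hc => hw (by simp [hc]))
      · exact (ih (fun hm => hw (by simp [hm])) s).mp h
    · intro h
      exact Or.inr ((ih (fun hm => hw (by simp [hm])) s).mpr h)

theorem pat_not_infix_short (s : List Char) (hs : s.length ≤ 2) : ¬ pvPat <:+: s := by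
  intro h
  have := h.length_le
  simp [pvPat, pvWhite, pvNoise] at this
  omega


theorem main_iff : ∀ (ws : List (List Char)), (∀ w ∈ ws, ' ' ∉ w) →
    (pvPat <:+: ' ' :: (PySem.Chars.join [' '] ws ++ [' ']) ↔ pairsC ws = true) := by
  intro ws
  induction ws with
  | nil =>
    intro _
    rw [PySem.Chars.join_nil]
    simp only [pairsC, List.nil_append]
    exact ⟨fun h => absurd h (pat_not_infix_short _ (by simp)), fun h => by simp at h⟩
  | cons w rest ih =>
    intro hclean
    have hw : ' ' ∉ w := hclean w (by simp)
    have hrest : ∀ v ∈ rest, ' ' ∉ v := fun v hv => hclean v (by simp [hv])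
    cases rest with
    | nil =>
      rw [PySem.Chars.join_singleton, List.infix_cons_iff]
      simp only [pairsC]
      constructor
      · rintro (h | h)
        · have h2 : (' ' = ' ') ∧ (pvWhite ++ ' ' :: (pvNoise ++ [' ']) <+: w ++ [' ']) := by
            simpa [pvPat] using h
          have h3 : pvWhite ++ ' ' :: (pvNoise ++ [' ']) <+: w ++ ' ' :: [] := by simpa using h2.2
          obtain ⟨-, h4⟩ := prefix_block pvWhite w _ _ (by decide) hw h3
          have := h4.length_le
          simp [pvNoise] at this
        · rw [show w ++ [' '] = w ++ ' ' :: [] by simp, peel w hw] at h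
          exact absurd h (pat_not_infix_short _ (by simp))
      · intro h; simp at h
    | cons w2 rest2 =>
      have hw2 : ' ' ∉ w2 := hrest w2 (by simp)
      rw [PySem.Chars.join_cons_cons]
      have hshape : ' ' :: (w ++ [' '] ++ PySem.Chars.join [' '] (w2 :: rest2) ++ [' '])
          = ' ' :: (w ++ ' ' :: (PySem.Chars.join [' '] (w2 :: rest2) ++ [' '])) := by simp
      rw [hshape, List.infix_cons_iff]
      have hsecond : (pvPat <:+: w ++ ' ' :: (PySem.Chars.join [' '] (w2 :: rest2) ++ [' ']))
          ↔ pairsC (w2 :: rest2) = true := by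
        rw [peel w hw]
        exact ih hrest
      have hfirst : (pvPat <+: ' ' :: (w ++ ' ' :: (PySem.Chars.join [' '] (w2 :: rest2) ++ [' '])))
          ↔ (w ++ ' ' :: w2 = pvWhite ++ ' ' :: pvNoise) := by
        constructor
        · intro h
          have h2 : pvWhite ++ ' ' :: (pvNoise ++ [' '])
              <+: w ++ ' ' :: (PySem.Chars.join [' '] (w2 :: rest2) ++ [' ']) := by
            simpa [pvPat] using h
          obtain ⟨hww, h3⟩ := prefix_block pvWhite w _ _ (by decide) hw h2
          have h4 : pvNoise ++ ' ' :: [] <+: PySem.Chars.join [' '] (w2 :: rest2) ++ [' '] := by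
            simpa using h3
          have h5 : pvNoise = w2 := by
            cases rest2 with
            | nil =>
              rw [PySem.Chars.join_singleton] at h4
              exact (prefix_block pvNoise w2 _ _ (by decide) hw2 (by simpa using h4)).1
            | cons c t =>
              rw [PySem.Chars.join_cons_cons] at h4
              have h6 : pvNoise ++ ' ' :: []
                  <+: w2 ++ ' ' :: (PySem.Chars.join [' '] (c :: t) ++ [' ']) := by
                simpa using h4
              exact (prefix_block pvNoise w2 _ _ (by decide) hw2 h6).1
          rw [hww, ← h5]
        · intro h
          obtain ⟨he1, he2⟩ := eq_block w pvWhite w2 pvNoise hw (by decide) (by simpa using h)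
          subst he1; subst he2
          cases rest2 with
          | nil =>
            rw [PySem.Chars.join_singleton]
            exact ⟨[], by simp [pvPat]⟩
          | cons c t =>
            rw [PySem.Chars.join_cons_cons]
            exact ⟨PySem.Chars.join [' '] (c :: t) ++ [' '], by simp [pvPat]⟩
      rw [hfirst, hsecond]
      simp [pairsC]


def pairsS : List String → Bool
  | a :: b :: t => ((a ++ " " ++ b) == "white noise") || pairsS (b :: t)
  | _ => false



theorem rangeAny_eq_pairsS : ∀ (ws : List String),
    (List.range (ws.length - 1)).any (fun i =>
      white_noise.contains (ws.getD i "" ++ " " ++ ws.getD (i+1) "")) = pairsS ws := by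
  intro ws
  induction ws with
  | nil => simp [pairsS]
  | cons a t ih =>
    cases t with
    | nil => simp [pairsS]
    | cons b t' =>
      have hlen : (a :: b :: t').length - 1 = ((b :: t').length - 1) + 1 := by simp
      rw [hlen, List.range_succ_eq_map]
      rw [List.any_cons, List.any_map]
      have hcomp : ((fun i => white_noise.contains
            ((a :: b :: t').getD i "" ++ " " ++ (a :: b :: t').getD (i+1) "")) ∘ Nat.succ)
          = fun i => white_noise.contains ((b :: t').getD i "" ++ " " ++ (b :: t').getD (i+1) "") := by
        funext i
        simp [Function.comp, Nat.succ_eq_add_one]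
      rw [hcomp, ih]
      have hc : white_noise.contains ((a :: b :: t').getD 0 "" ++ " " ++ (a :: b :: t').getD (0+1) "")
          = ((a ++ " " ++ b) == "white noise") := by
        show white_noise.contains (a ++ " " ++ b) = _
        rw [white_noise, List.contains_cons, List.contains_nil, Bool.or_false,
          Bool.eq_iff_iff, beq_iff_eq]
      rw [hc]
      rfl

theorem pairsS_eq_pairsC : ∀ (ws : List String), pairsS ws = pairsC (ws.map String.toList) := by
  intro ws
  induction ws with
  | nil => simp [pairsS, pairsC]
  | cons a t ih =>
    cases t with
    | nil => simp [pairsS, pairsC]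
    | cons b t' =>
      simp only [pairsS, pairsC, List.map_cons, ih]
      congr 1
      have h : (a ++ " " ++ b = "white noise") ↔
          (a.toList ++ ' ' :: b.toList = pvWhite ++ ' ' :: pvNoise) := by
        rw [← String.toList_inj]
        rw [String.toList_append, String.toList_append]
        rw [show (" ").toList = [' '] from rfl,
          show ("white noise").toList = pvWhite ++ ' ' :: pvNoise from rfl]
        simp
      simp [h]

theorem contians_wn_eq_pairsC (in_str : String) :
    contians_wn in_str = pairsC (PySem.Chars.split₀ in_str.toList) := by
  unfold contians_wn
  by_cases h : (PySem.Str.len in_str == 0) = true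
  · have hlen : in_str.toList.length = 0 := by
      have h0 := beq_iff_eq.mp h
      rw [PySem.Str.len_eq] at h0
      exact_mod_cast h0
    have hnil : in_str.toList = [] := List.length_eq_zero_iff.mp hlen
    rw [if_pos h, hnil]
    rfl
  · rw [if_neg (by simpa using h)]
    rw [rangeAny_eq_pairsS, pairsS_eq_pairsC, PySem.Str.split₀_map_toList]

theorem contians_wn_alt_eq_pairsC (in_str : String) :
    contians_wn_alt in_str = pairsC (PySem.Chars.split₀ in_str.toList) := by
  unfold contians_wn_alt
  rw [PySem.Str.isIn_eq]
  have harg : (" " ++ PySem.Str.join " " (PySem.Str.split₀ in_str) ++ " ").toList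
      = ' ' :: (PySem.Chars.join [' '] (PySem.Chars.split₀ in_str.toList) ++ [' ']) := by
    rw [String.toList_append, String.toList_append, PySem.Str.toList_join,
      PySem.Str.split₀_map_toList]
    rfl
  rw [harg, show (" white noise ").toList = pvPat by decide]
  rw [Bool.eq_iff_iff, PySem.Chars.isIn_iff_infix]
  exact main_iff (PySem.Chars.split₀ in_str.toList) (split₀_spacefree _)

-- ===== VERDICT (by name: the statement is the Claim_ definition above) =====
theorem contians_wn_spec : Claim_equal_contians_wn := by
  intro in_str _
  unfold Spec_contians_wn
  rw [contians_wn_eq_pairsC, contians_wn_alt_eq_pairsC]
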